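-- pv_equiv track=rewrite | github.com/MadTown86/codewars_problems | warfiles/summationtriangle2.py | get_sum_buildingtriangle
-- ===== SOURCE A (Python) =====
-- def get_sum_buildingtriangle(n):
--     if n == 0:
--         return 1
--     row, col = 0, 0
--
--     equation = lambda row, col: (2 * row + col + 1) * ((-1) ** (2 * row + col))
--     tri_sum = 0
--
--     def rowcur(n, row, col, colm):
--         templ = []
--         if colm > col:
--             col += 1
--             return rowcur(n, row, col, colm)
--         if col == n + 1:
--             return []
--         else:
--             templ.append(equation(row, col))
--             col += 1
--             return templ + rowcur(n, row, col, colm)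
--
--     colm = -1
--     while row < n + 1:
--         row_list = []
--         row_list.append(rowcur(n, row, col, colm))
--         tri_sum += sum(row_list[0])
--         row += 1
--         colm = row
--
--     return tri_sum
-- ===== SOURCE B (Python) =====
-- def get_sum_buildingtriangle(n):
--     # closed-form O(1) formula for the alternating triangular sum
--     if n < 0:
--         return 0
--     m, r = divmod(n, 2)
--     return (4 * m + 1) * (m + 1) if r == 0 else -((4 * m + 5) * (m + 1))
-- ===== Notes on version B (the rewrite author's own statement) =====
-- stated objective: faster
-- what changed: replaced the per-row recursive list construction and O(n^2) double summation by an O(1) closed-form formula (derived by swapping summation order: each column c contributes (-1)^c*(c+1)*(2c+1), which telescopes to a quadratic in n//2).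
import Mathlib
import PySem

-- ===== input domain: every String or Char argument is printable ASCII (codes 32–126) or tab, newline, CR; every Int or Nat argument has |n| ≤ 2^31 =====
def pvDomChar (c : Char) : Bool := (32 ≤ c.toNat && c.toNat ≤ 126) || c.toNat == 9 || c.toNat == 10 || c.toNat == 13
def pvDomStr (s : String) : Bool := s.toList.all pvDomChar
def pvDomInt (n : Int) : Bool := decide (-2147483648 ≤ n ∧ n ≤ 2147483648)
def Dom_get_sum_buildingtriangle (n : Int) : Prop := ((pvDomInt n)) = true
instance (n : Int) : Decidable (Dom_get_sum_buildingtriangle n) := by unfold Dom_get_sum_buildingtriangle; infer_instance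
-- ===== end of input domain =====

-- B replaces A's O(n^2) recursive row-by-row summation by an O(1) closed-form formula.

-- ===== PORT A =====
-- equation = lambda row, col: (2*row+col+1) * ((-1)**(2*row+col))
-- at every reachable call 2*row+col ≥ 0, where natAbs is exact
def pvEquation (row col : Int) : Int :=
  (2 * row + col + 1) * ((-1 : Int) ^ (2 * row + col).natAbs)

-- rowcur(n, row, col, colm); fuel only guards the recursion, it is ample at every call site
def pvRowcur (fuel : Nat) (n row col colm : Int) : List Int :=
  match fuel with
  | 0 => []
  | fuel + 1 =>
    if colm > col then pvRowcur fuel n row (col + 1) colm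
    else if col = n + 1 then []
    else pvEquation row col :: pvRowcur fuel n row (col + 1) colm

-- the while loop: row counts up while row < n + 1; iteration count (n+1).toNat is exact
def pvLoop (iters : Nat) (n row colm tri_sum : Int) : Int :=
  match iters with
  | 0 => tri_sum
  | k + 1 =>
    if row < n + 1 then
      pvLoop k n (row + 1) (row + 1) (tri_sum + (pvRowcur (2 * n + 4).toNat n row 0 colm).sum)
    else tri_sum

def get_sum_buildingtriangle (n : Int) : Int :=
  if n = 0 then 1
  else pvLoop (n + 1).toNat n 0 (-1) 0

-- ===== PORT B =====
def get_sum_buildingtriangle_alt (n : Int) : Int :=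
  if n < 0 then 0
  else
    let m := PySem.Int.floordiv n 2
    let r := PySem.Int.mod n 2
    if r = 0 then (4 * m + 1) * (m + 1) else -((4 * m + 5) * (m + 1))

-- ===== PRECONDITION & SPEC =====
-- Pre_ excludes larger n, where A's per-row recursion (depth about n) overflows
-- CPython's default recursion limit and raises RecursionError instead of returning.
def Pre_get_sum_buildingtriangle (n : Int) : Prop := n ≤ 996
instance (n : Int) : Decidable (Pre_get_sum_buildingtriangle n) := by
  unfold Pre_get_sum_buildingtriangle; infer_instance

def pvWitness_get_sum_buildingtriangle : Int := 5

def Spec_get_sum_buildingtriangle (n : Int) (out : Int) : Prop := out = get_sum_buildingtriangle_alt n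
instance (n : Int) (out : Int) : Decidable (Spec_get_sum_buildingtriangle n out) := by
  unfold Spec_get_sum_buildingtriangle; infer_instance

-- ===== CLAIM (what is proved, stated in full; the proofs are below) =====
def Claim_equal_get_sum_buildingtriangle : Prop :=
  ∀ (n : Int), Dom_get_sum_buildingtriangle n → Pre_get_sum_buildingtriangle n →
    Spec_get_sum_buildingtriangle n (get_sum_buildingtriangle n)

-- ===== LEMMAS AND PROOFS =====

-- the emit phase of rowcur, as a plain structural list
def pvEmit (row col : Int) (k : Nat) : List Int :=
  match k with
  | 0 => []
  | k + 1 => pvEquation row col :: pvEmit row (col + 1) k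

lemma rowcur_skip (s : Nat) : ∀ (fuel : Nat) (n row col : Int),
    pvRowcur (s + fuel) n row col (col + s) = pvRowcur fuel n row (col + s) (col + s) := by
  induction s with
  | zero => intro fuel n row col; norm_num
  | succ s ih =>
    intro fuel n row col
    have h1 : s + 1 + fuel = (s + fuel) + 1 := by omega
    rw [h1, pvRowcur, if_pos (by push_cast; omega)]
    have h2 : col + (↑(s + 1) : Int) = (col + 1) + ↑s := by push_cast; ring
    rw [h2, ih fuel n row (col + 1)]

lemma rowcur_emit : ∀ (fuel k : Nat) (n row col colm : Int), k < fuel → colm ≤ col →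
    n + 1 = col + k → pvRowcur fuel n row col colm = pvEmit row col k := by
  intro fuel
  induction fuel with
  | zero => intro k n row col colm h; omega
  | succ fuel ih =>
    intro k n row col colm hk hcolm hn
    rw [pvRowcur, if_neg (by omega)]
    cases k with
    | zero => rw [if_pos (by push_cast at hn ⊢; omega)]; rfl
    | succ k =>
      rw [if_neg (by push_cast at hn ⊢; omega), pvEmit,
        ih k n row (col + 1) colm (by omega) (by omega) (by push_cast at hn ⊢; omega)]

lemma emit_sum : ∀ (k : Nat) (row col : Int),
    (pvEmit row col k).sum = ∑ j ∈ Finset.range k, pvEquation row (col + j) := by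
  intro k
  induction k with
  | zero => simp [pvEmit]
  | succ k ih =>
    intro row col
    rw [pvEmit, List.sum_cons, ih row (col + 1), Finset.sum_range_succ']
    rw [add_comm]
    congr 1
    · apply Finset.sum_congr rfl
      intro j _
      congr 1
      push_cast; ring
    · norm_num

-- the list built by rowcur at each call the while loop makes
lemma rowlist (n row colm : Int) (h0 : 0 ≤ row) (h1 : row ≤ n + 1)
    (h2 : (colm = -1 ∧ row = 0) ∨ colm = row) :
    pvRowcur (2 * n + 4).toNat n row 0 colm = pvEmit row row (n + 1 - row).toNat := by
  rcases h2 with ⟨hc, hr⟩ | hc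
  · subst hc hr
    have := rowcur_emit (2 * n + 4).toNat (n + 1 - 0).toNat n 0 0 (-1)
      (by omega) (by omega) (by omega)
    simpa using this
  · rw [hc]
    have hs : (2 * n + 4).toNat = row.toNat + ((2 * n + 4).toNat - row.toNat) := by omega
    have harg : row = (0 : Int) + (row.toNat : Int) := by omega
    have key := rowcur_skip row.toNat ((2 * n + 4).toNat - row.toNat) n row 0
    rw [← harg] at key
    rw [hs, key]
    exact rowcur_emit _ _ n row row row (by omega) le_rfl (by omega)

lemma loop_sum : ∀ (k : Nat) (n row colm acc : Int), 0 ≤ row → row + k = n + 1 →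
    ((colm = -1 ∧ row = 0) ∨ colm = row) →
    pvLoop k n row colm acc =
      acc + ∑ i ∈ Finset.range k, (pvEmit (row + i) (row + i) (n + 1 - (row + i)).toNat).sum := by
  intro k
  induction k with
  | zero => intro n row colm acc _ _ _; simp [pvLoop]
  | succ k ih =>
    intro n row colm acc h0 hk hc
    rw [pvLoop, if_pos (by push_cast at hk; omega),
      rowlist n row colm h0 (by push_cast at hk; omega) hc,
      ih n (row + 1) (row + 1) _ (by omega) (by push_cast at hk ⊢; omega) (Or.inr rfl),
      Finset.sum_range_succ']
    simp only [Nat.cast_add, Nat.cast_zero, Nat.cast_one, add_zero]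
    have : ∀ i ∈ Finset.range k,
        (pvEmit (row + 1 + i) (row + 1 + i) (n + 1 - (row + 1 + i)).toNat).sum =
        (pvEmit (row + (i + 1)) (row + (i + 1)) (n + 1 - (row + (i + 1))).toNat).sum := by
      intro i _
      have : row + 1 + (i : Int) = row + (i + 1) := by ring
      rw [this]
    rw [Finset.sum_congr rfl this]
    ring

-- ∑_{r<k} 2r = k(k-1) over Int
lemma sum_two_mul (k : Nat) : ∑ r ∈ Finset.range k, (2 * (r : Int)) = k * (k - 1) := by
  induction k with
  | zero => simp
  | succ k ih => rw [Finset.sum_range_succ, ih]; push_cast; ring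

-- a single column's contribution
lemma col_sum (c : Nat) :
    ∑ r ∈ Finset.range (c + 1), pvEquation (r : Int) (c : Int) =
      (-1 : Int) ^ c * ((c : Int) + 1) * (2 * c + 1) := by
  have hterm : ∀ r ∈ Finset.range (c + 1), pvEquation (r : Int) (c : Int) =
      (-1 : Int) ^ c * (2 * (r : Int)) + (-1 : Int) ^ c * ((c : Int) + 1) := by
    intro r _
    have h1 : (2 * (r : Int) + c).natAbs = 2 * r + c := by omega
    rw [pvEquation, h1, pow_add, pow_mul]
    norm_num
    ring
  rw [Finset.sum_congr rfl hterm, Finset.sum_add_distrib, ← Finset.mul_sum,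
    sum_two_mul (c + 1), Finset.sum_const, Finset.card_range]
  push_cast
  ring

-- the column-major closed form, by induction on N
lemma colsum_closed (N : Nat) :
    ∑ c ∈ Finset.range (N + 1), (-1 : Int) ^ c * ((c : Int) + 1) * (2 * c + 1) =
      (if N % 2 = 0 then (4 * ((N / 2 : Nat) : Int) + 1) * (((N / 2 : Nat) : Int) + 1)
       else -((4 * ((N / 2 : Nat) : Int) + 5) * (((N / 2 : Nat) : Int) + 1))) := by
  induction N with
  | zero => simp
  | succ N ih =>
    rw [Finset.sum_range_succ, ih]
    rcases Nat.even_or_odd N with ⟨m, hm⟩ | ⟨m, hm⟩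
    · have h1 : N % 2 = 0 := by omega
      have h2 : (N + 1) % 2 ≠ 0 := by omega
      have h3 : N / 2 = m := by omega
      have h4 : (N + 1) / 2 = m := by omega
      have h5 : (-1 : Int) ^ (N + 1) = -1 := by
        rw [show N + 1 = 2 * m + 1 from by omega, pow_succ, pow_mul]; norm_num
      rw [if_pos h1, if_neg h2, h3, h4, h5]
      have hm' : N = 2 * m := by omega
      subst hm'; push_cast; ring
    · have h1 : N % 2 ≠ 0 := by omega
      have h2 : (N + 1) % 2 = 0 := by omega
      have h3 : N / 2 = m := by omega
      have h4 : (N + 1) / 2 = m + 1 := by omega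
      have h5 : (-1 : Int) ^ (N + 1) = 1 := by
        rw [show N + 1 = 2 * (m + 1) from by omega, pow_mul]; norm_num
      rw [if_neg h1, if_pos h2, h3, h4, h5]
      subst hm; push_cast; ring

-- row-major double sum = column-major double sum (swap summation order)
lemma triangle_swap (N : Nat) :
    ∑ r ∈ Finset.range (N + 1), ∑ j ∈ Finset.range (N + 1 - r), pvEquation (r : Int) ((r : Int) + j) =
      ∑ c ∈ Finset.range (N + 1), ∑ r ∈ Finset.range (c + 1), pvEquation (r : Int) (c : Int) := by
  have h1 : ∀ r ∈ Finset.range (N + 1),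
      ∑ j ∈ Finset.range (N + 1 - r), pvEquation (r : Int) ((r : Int) + j) =
      ∑ c ∈ Finset.Ico r (N + 1), pvEquation (r : Int) (c : Int) := by
    intro r _
    rw [Finset.sum_Ico_eq_sum_range]
    apply Finset.sum_congr rfl
    intro j _
    congr 1
  rw [Finset.sum_congr rfl h1, Finset.range_eq_Ico, Finset.sum_Ico_Ico_comm]

-- main bridge for nonnegative n
lemma pos_case (N : Nat) :
    pvLoop ((N : Int) + 1).toNat (N : Int) 0 (-1) 0 = get_sum_buildingtriangle_alt (N : Int) := by
  have hiters : ((N : Int) + 1).toNat = N + 1 := by omega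
  rw [hiters, loop_sum (N + 1) (N : Int) 0 (-1) 0 le_rfl (by push_cast; omega) (Or.inl ⟨rfl, rfl⟩)]
  have hrows : ∀ i ∈ Finset.range (N + 1),
      (pvEmit ((0 : Int) + i) ((0 : Int) + i) ((N : Int) + 1 - ((0 : Int) + i)).toNat).sum =
      ∑ j ∈ Finset.range (N + 1 - i), pvEquation (i : Int) ((i : Int) + j) := by
    intro i hi
    have hi' : i ≤ N := by simpa [Nat.lt_succ_iff] using hi
    have h0 : ((0 : Int) + i) = (i : Int) := by ring
    have hk : ((N : Int) + 1 - (i : Int)).toNat = N + 1 - i := by omega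
    rw [h0, hk, emit_sum]
  rw [Finset.sum_congr rfl hrows, triangle_swap N,
    Finset.sum_congr rfl (fun c _ => col_sum c), colsum_closed N]
  have hfd : PySem.Int.floordiv (N : Int) 2 = ((N / 2 : Nat) : Int) := by
    exact_mod_cast PySem.Int.floordiv_natCast N 2
  have hmod : PySem.Int.mod (N : Int) 2 = ((N % 2 : Nat) : Int) := by
    exact_mod_cast PySem.Int.mod_natCast N 2
  have hN0 : ¬ ((N : Int) < 0) := by omega
  simp only [get_sum_buildingtriangle_alt, hfd, hmod, if_neg hN0, Nat.cast_eq_zero, zero_add]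

-- ===== VERDICT (by name: the statement is the Claim_ definition above) =====
theorem get_sum_buildingtriangle_spec : Claim_equal_get_sum_buildingtriangle := by
  intro n _ _
  unfold Spec_get_sum_buildingtriangle get_sum_buildingtriangle
  rcases lt_or_ge n 0 with hneg | hpos
  · rw [if_neg (by omega)]
    have h0 : (n + 1).toNat = 0 := by omega
    rw [h0]
    unfold pvLoop get_sum_buildingtriangle_alt
    rw [if_pos hneg]
  · obtain ⟨N, rfl⟩ : ∃ N : Nat, n = (N : Int) := ⟨n.toNat, by omega⟩
    by_cases h0 : (N : Int) = 0
    · rw [if_pos h0, h0]; decide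
    · rw [if_neg h0]; exact pos_case N
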